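-- pv_equiv track=rewrite | github.com/URL78/GenAI_Lab_Code | Lab_8/GenAI_lab_8.py | evaluate
-- ===== SOURCE A (Python) =====
-- def evaluate(answers):
--     if not answers:
--         raise ValueError("Answers cannot be empty")
--
--     score = 0
--     for ans in answers:
--         if len(ans.strip()) > 20:
--             score += 10
--         else:
--             score += 5
--
--     return score
-- ===== SOURCE B (Python) =====
-- def evaluate(answers):
--     if not answers:
--         raise ValueError("Answers cannot be empty")
--     return _total(answers, 0, len(answers))
--
--
-- def _total(answers, lo, hi):
--     # divide-and-conquer sum of per-answer scores over the index range [lo, hi)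
--     if hi - lo == 0:
--         return 0
--     if hi - lo == 1:
--         return 10 if len(answers[lo].strip()) > 20 else 5
--     mid = (lo + hi) // 2
--     return _total(answers, lo, mid) + _total(answers, mid, hi)
-- ===== Notes on version B (the rewrite author's own statement) =====
-- stated objective: alternative
-- what changed: Replaces the left-to-right branch-and-accumulate loop with a recursive divide-and-conquer that splits the index range in half and sums the two halves, scoring single answers at the leaves.
import Mathlib
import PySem

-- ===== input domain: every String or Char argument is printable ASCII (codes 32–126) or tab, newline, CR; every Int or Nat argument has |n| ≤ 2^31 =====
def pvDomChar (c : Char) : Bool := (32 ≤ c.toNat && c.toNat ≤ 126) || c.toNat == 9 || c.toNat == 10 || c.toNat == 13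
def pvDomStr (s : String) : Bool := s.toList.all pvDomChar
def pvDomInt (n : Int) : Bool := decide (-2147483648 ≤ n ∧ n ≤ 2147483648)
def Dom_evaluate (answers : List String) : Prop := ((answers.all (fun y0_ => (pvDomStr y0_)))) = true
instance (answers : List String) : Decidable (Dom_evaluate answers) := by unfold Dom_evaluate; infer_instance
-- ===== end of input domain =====

-- B scores by recursive divide-and-conquer on index ranges instead of A's left-to-right accumulate; Pre_ excludes the empty list, on which A raises ValueError.

-- ===== PORT A =====
def evaluate (answers : List String) : Int :=
  answers.foldl
    (fun score ans => if PySem.Str.len (PySem.Str.strip ans) > 20 then score + 10 else score + 5)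
    0

-- ===== PORT B =====
-- _total: indices lo, hi are nonnegative Python ints kept in 0 ≤ lo ≤ hi ≤ len(answers),
-- so Nat indices and Nat `/ 2` are exact for Python's `//` here; answers[lo] with lo < length → getD.
def evalTotal (answers : List String) (lo hi : Nat) : Int :=
  if hi - lo = 0 then 0
  else if hi - lo = 1 then
    (if PySem.Str.len (PySem.Str.strip (answers.getD lo "")) > 20 then 10 else 5)
  else
    evalTotal answers lo ((lo + hi) / 2) + evalTotal answers ((lo + hi) / 2) hi
termination_by hi - lo
decreasing_by all_goals omega

def evaluate_alt (answers : List String) : Int :=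
  evalTotal answers 0 answers.length

-- ===== PRECONDITION & SPEC =====
-- A raises ValueError on the empty list; Pre_ excludes exactly that input.
def Pre_evaluate (answers : List String) : Prop := answers ≠ []
instance (answers : List String) : Decidable (Pre_evaluate answers) := by unfold Pre_evaluate; infer_instance
def pvWitness_evaluate : List String := (["hi"])
def Spec_evaluate (answers : List String) (out : Int) : Prop := out = evaluate_alt answers
instance (answers : List String) (out : Int) : Decidable (Spec_evaluate answers out) := by unfold Spec_evaluate; infer_instance

-- ===== CLAIM =====
def Claim_equal_evaluate : Prop := ∀ (answers : List String), Dom_evaluate answers → Pre_evaluate answers → Spec_evaluate answers (evaluate answers)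

-- ===== LEMMAS AND PROOFS =====
def pvScore (a : String) : Int := if PySem.Str.len (PySem.Str.strip a) > 20 then 10 else 5

def pvSum (xs : List String) : Int := (xs.map pvScore).sum

theorem pvSum_append (xs ys : List String) : pvSum (xs ++ ys) = pvSum xs + pvSum ys := by
  simp [pvSum]

theorem evalTotal_eq (answers : List String) (lo hi : Nat)
    (h1 : lo ≤ hi) (h2 : hi ≤ answers.length) :
    evalTotal answers lo hi = pvSum ((answers.drop lo).take (hi - lo)) := by
  rw [evalTotal]
  split
  · next h0 => simp [show hi - lo = 0 from h0, pvSum]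
  · next h0 =>
    split
    · next h1' =>
      have hlt : lo < answers.length := by omega
      rw [h1', List.take_one]
      have : (answers.drop lo).head? = some (answers.getD lo "") := by
        rw [List.head?_drop]
        simp [List.getD, List.getElem?_eq_getElem hlt]
      simp [this, pvSum, pvScore]
    · next h1' =>
      have hm1 : lo ≤ (lo + hi) / 2 := by omega
      have hm2 : (lo + hi) / 2 ≤ hi := by omega
      rw [evalTotal_eq answers lo ((lo + hi) / 2) hm1 (by omega),
          evalTotal_eq answers ((lo + hi) / 2) hi hm2 h2]
      rw [← pvSum_append]
      congr 1
      have : answers.drop ((lo + hi) / 2) = (answers.drop lo).drop ((lo + hi) / 2 - lo) := by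
        rw [List.drop_drop]; congr 1; omega
      rw [this, ← List.take_add]
      congr 1; omega
termination_by hi - lo
decreasing_by all_goals omega

theorem foldl_eq_pvSum (answers : List String) (s : Int) :
    answers.foldl
      (fun score ans => if PySem.Str.len (PySem.Str.strip ans) > 20 then score + 10 else score + 5)
      s = s + pvSum answers := by
  induction answers generalizing s with
  | nil => simp [pvSum]
  | cons a t ih =>
    by_cases h : PySem.Str.len (PySem.Str.strip a) > 20
    · simp only [List.foldl_cons, if_pos h, ih, pvSum, pvScore, List.map_cons, List.sum_cons]
      ring
    · simp only [List.foldl_cons, if_neg h, ih, pvSum, pvScore, List.map_cons, List.sum_cons]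
      ring

-- ===== VERDICT =====
theorem evaluate_spec : Claim_equal_evaluate := by
  intro answers _ _
  unfold Spec_evaluate evaluate evaluate_alt
  rw [foldl_eq_pvSum, evalTotal_eq answers 0 answers.length (Nat.zero_le _) le_rfl]
  simp
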